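-- pv_equiv track=rewrite | github.com/Ananth1-9/CSC-110 | Programming projects/wordsearch.py | find_word_in_list
-- ===== SOURCE A (Python) =====
-- def reverse_string(s):
--     '''
--     Reverses a string
--     Args:
--     s: the string to reverse.
--     Returns:
--     The reversed string.
--     '''
--     rev = ""
--     length = len(s)
--     #reverse the string
--     for i in range(length):
--         index = length - 1 - i
--         rev += s[index]
--     return rev
--
-- def find_word_in_list(lines, word, is_vertical):
--     '''
--     Searches for a word in a list of strings.
--     Args:
--     lines: list of strings.
--     word: the word to search for.
--     is_vertical: boolean, True if searching columns.
--     Returns: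
--     A list [row, col] if found, or None if not found.
--     '''
--     #search forward
--     for i in range(len(lines)):
--         line = lines[i]
--         index = line.lower().find(word)
--         if index != -1:
--             if is_vertical:
--                 return [index + 1, i + 1]
--             else:
--                 return [i + 1, index + 1]
--     rev_word = reverse_string(word)
--     #search backward
--     for i in range(len(lines)):
--         line = lines[i]
--         index = line.lower().find(rev_word)
--         if index != -1:
--             real_start = index + len(word) - 1
--             if is_vertical:
--                 return [real_start + 1, i + 1]
--             else:
--                 return [i + 1, real_start + 1]
--
--     return None
-- ===== SOURCE B (Python) =====
-- def find_word_in_list(lines, word, is_vertical):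
--     rev_word = word[::-1]
--     backward = None
--     for i, line in enumerate(lines):
--         low = line.lower()
--         j = low.find(word)
--         if j != -1:
--             return [j + 1, i + 1] if is_vertical else [i + 1, j + 1]
--         if backward is None:
--             k = low.find(rev_word)
--             if k != -1:
--                 real_start = k + len(word) - 1
--                 backward = [real_start + 1, i + 1] if is_vertical else [i + 1, real_start + 1]
--     return backward
-- ===== Notes on version B (the rewrite author's own statement) =====
-- stated objective: alternative
-- what changed: A's two sequential passes over the lines (forward search, then a full second pass for the reversed word) are replaced by a single pass that returns a forward match immediately and merely records the first backward candidate, returned after the loop; the hand-rolled character-by-character reverse_string loop is replaced by word[::-1].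
import Mathlib
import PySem

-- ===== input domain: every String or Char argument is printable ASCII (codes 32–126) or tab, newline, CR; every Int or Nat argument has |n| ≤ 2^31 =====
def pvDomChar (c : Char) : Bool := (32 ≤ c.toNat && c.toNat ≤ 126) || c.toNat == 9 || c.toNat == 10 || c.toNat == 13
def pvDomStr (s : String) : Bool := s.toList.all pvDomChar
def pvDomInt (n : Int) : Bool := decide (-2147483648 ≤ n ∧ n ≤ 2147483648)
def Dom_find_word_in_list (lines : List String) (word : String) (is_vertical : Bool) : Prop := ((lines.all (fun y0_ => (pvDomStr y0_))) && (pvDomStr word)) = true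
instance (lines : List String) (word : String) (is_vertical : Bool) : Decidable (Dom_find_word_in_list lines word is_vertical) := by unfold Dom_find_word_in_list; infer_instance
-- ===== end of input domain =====

-- B replaces A's two sequential passes over the lines by one pass that returns a forward
-- match immediately and defers the first backward candidate to the end (objective: alternative decomposition, same cost).

-- ===== PORT A =====
-- rev += s[index] for index = len(s)-1-i (always in range, so the IndexError branch is unreachable; none falls back to no-op)
def reverse_string (s : String) : String :=
  String.ofList ((PySem.List.pyRange 0 (PySem.Str.len s) 1).foldl
    (fun rev i =>
      match PySem.Chars.pyGet? s.toList (PySem.Str.len s - 1 - i) with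
      | some c => rev ++ [c]
      | none => rev) [])

-- first loop of A: 'for i in range(len(lines)):' with line = lines[i], early return on forward match
def aForward (word : String) (iv : Bool) : List (Int × String) → Option (List Int)
  | [] => none
  | (i, line) :: rest =>
    let index := PySem.Str.find (PySem.Str.lower line) word
    if index ≠ -1 then
      some (if iv then [index + 1, i + 1] else [i + 1, index + 1])
    else aForward word iv rest

-- second loop of A: same traversal, searching rev_word, returning real_start
def aBackward (word rev_word : String) (iv : Bool) : List (Int × String) → Option (List Int)
  | [] => none
  | (i, line) :: rest =>
    let index := PySem.Str.find (PySem.Str.lower line) rev_word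
    if index ≠ -1 then
      let real_start := index + PySem.Str.len word - 1
      some (if iv then [real_start + 1, i + 1] else [i + 1, real_start + 1])
    else aBackward word rev_word iv rest

def find_word_in_list (lines : List String) (word : String) (is_vertical : Bool) : Option (List Int) :=
  match aForward word is_vertical (PySem.List.enumerate lines 0) with
  | some r => some r
  | none =>
    let rev_word := reverse_string word
    aBackward word rev_word is_vertical (PySem.List.enumerate lines 0)

-- ===== PORT B =====
-- single pass: forward match returns at once; first backward match is only recorded
def bLoop (word rev_word : String) (iv : Bool) : List (Int × String) → Option (List Int) → Option (List Int)
  | [], backward => backward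
  | (i, line) :: rest, backward =>
    let low := PySem.Str.lower line
    let j := PySem.Str.find low word
    if j ≠ -1 then
      some (if iv then [j + 1, i + 1] else [i + 1, j + 1])
    else
      let backward' :=
        match backward with
        | some c => some c
        | none =>
          let k := PySem.Str.find low rev_word
          if k ≠ -1 then
            let real_start := k + PySem.Str.len word - 1
            some (if iv then [real_start + 1, i + 1] else [i + 1, real_start + 1])
          else none
      bLoop word rev_word iv rest backward'

def find_word_in_list_alt (lines : List String) (word : String) (is_vertical : Bool) : Option (List Int) :=
  -- word[::-1]
  let rev_word := (PySem.Str.slice? word none none (-1)).getD word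
  bLoop word rev_word is_vertical (PySem.List.enumerate lines 0) none

-- ===== PRECONDITION & SPEC =====
def Spec_find_word_in_list (lines : List String) (word : String) (is_vertical : Bool) (out : Option (List Int)) : Prop := out = find_word_in_list_alt lines word is_vertical
instance (lines : List String) (word : String) (is_vertical : Bool) (out : Option (List Int)) : Decidable (Spec_find_word_in_list lines word is_vertical out) := by unfold Spec_find_word_in_list; infer_instance

-- ===== CLAIM (what is proved, stated in full; the proofs are below) =====
def Claim_equal_find_word_in_list : Prop := ∀ (lines : List String) (word : String) (is_vertical : Bool), Dom_find_word_in_list lines word is_vertical → Spec_find_word_in_list lines word is_vertical (find_word_in_list lines word is_vertical)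

-- ===== LEMMAS AND PROOFS =====

-- A's reversal loop, in full generality over the fold: after m steps it has emitted the last m chars reversed
theorem rev_fold_eq (cs : List Char) (m : Nat) (hm : m ≤ cs.length) (acc : List Char) :
    (PySem.List.pyRange 0 (m : Int) 1).foldl
      (fun rev i =>
        match PySem.Chars.pyGet? cs ((cs.length : Int) - 1 - i) with
        | some c => rev ++ [c]
        | none => rev) acc = acc ++ (cs.drop (cs.length - m)).reverse := by
  induction m generalizing acc with
  | zero => simp [PySem.List.pyRange_one_eq_nil]
  | succ m ih =>
    have h1 : ((m : Int) + 1) = ((m + 1 : Nat) : Int) := by push_cast; ring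
    rw [← h1, PySem.List.pyRange_one_succ_right (by positivity), List.foldl_append,
      ih (by omega)]
    have hidx : (cs.length : Int) - 1 - (m : Int) = ((cs.length - 1 - m : Nat) : Int) := by
      omega
    have hlt : cs.length - 1 - m < cs.length := by omega
    simp only [List.foldl_cons, List.foldl_nil, hidx]
    rw [show PySem.Chars.pyGet? cs ((cs.length - 1 - m : Nat) : Int)
          = cs[cs.length - 1 - m]? from PySem.List.pyGet?_natCast cs _]
    rw [List.getElem?_eq_getElem hlt]
    have hdrop : cs.drop (cs.length - (m + 1)) = cs[cs.length - 1 - m] :: cs.drop (cs.length - m) := by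
      have e : cs.length - (m + 1) = cs.length - 1 - m := by omega
      rw [e, List.drop_eq_getElem_cons (by omega),
        show cs.length - 1 - m + 1 = cs.length - m from by omega]
    rw [hdrop]
    simp

-- A's hand-rolled reversal loop computes the reversed string
theorem reverse_string_eq (s : String) : reverse_string s = String.ofList s.toList.reverse := by
  unfold reverse_string
  rw [PySem.Str.len_eq, rev_fold_eq s.toList s.toList.length le_rfl []]
  simp

-- the single pass with a deferred backward candidate equals A's two sequential passes
theorem bLoop_eq (word rev_word : String) (iv : Bool) :
    ∀ (l : List (Int × String)) (acc : Option (List Int)),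
      bLoop word rev_word iv l acc =
        match aForward word iv l with
        | some r => some r
        | none =>
          match acc with
          | some c => some c
          | none => aBackward word rev_word iv l := by
  intro l
  induction l with
  | nil => intro acc; cases acc <;> simp [bLoop, aForward, aBackward]
  | cons p rest ih =>
    intro acc
    obtain ⟨i, line⟩ := p
    by_cases hj : PySem.Chars.find (PySem.Chars.lower line.toList) word.toList = -1
    · by_cases hk : PySem.Chars.find (PySem.Chars.lower line.toList) rev_word.toList = -1
      · cases acc <;> simp only [bLoop, aForward, aBackward] <;> rw [ih] <;> simp [hj, hk]
      · cases acc <;> simp only [bLoop, aForward, aBackward] <;> rw [ih] <;> simp [hj, hk]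
    · simp [bLoop, aForward, hj]

-- ===== VERDICT (by name: the statement is the Claim_ definition above) =====
theorem find_word_in_list_spec : Claim_equal_find_word_in_list := by
  intro lines word iv _
  unfold Spec_find_word_in_list find_word_in_list find_word_in_list_alt
  rw [bLoop_eq]
  rw [PySem.Str.slice?_none_none_neg_one]
  rw [← reverse_string_eq]
  cases aForward word iv (PySem.List.enumerate lines 0) <;> rfl
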